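-- pv_equiv track=rewrite | github.com/bominkm/Algorithm-Study | 프로그래머스-문자열-압축.py | solution
-- ===== SOURCE A (Python) =====
-- def solution(text):
--     length = []
--     length.append(len(text))
--     # 자르는 단위
--     for i in range(1, len(text)//2+1):
--         num = [len(text)//i + 1 if len(text)%i != 0 else len(text)//i][0]
--         # 반복되는지
--         words = {}
--         for word in [text[j*i:(j+1)*i] for j in range(num)]:
--             if word not in words:
--                 words[word] = 1
--             else:
--                 words[word] += 1
--         # 문자열 만들기
--         make = []
--         for k in range(len(words)):
--             if list(words.values())[k] != 1:
--                 make.append(str(list(words.values())[k]))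
--             make.append(list(words.keys())[k])
--         length.append(len(''.join(make)))
--     return min(length)
-- ===== SOURCE B (Python) =====
-- def solution(text):
--     n = len(text)
--     best = n
--     for i in range(1, n // 2 + 1):
--         chunks = sorted([text[j:j + i] for j in range(0, n, i)])
--         total = 0
--         prev = None
--         run = 0
--         for w in chunks:
--             if w == prev:
--                 run += 1
--             else:
--                 if prev is not None:
--                     total += len(prev) + (len(str(run)) if run != 1 else 0)
--                 prev = w
--                 run = 1
--         if prev is not None:
--             total += len(prev) + (len(str(run)) if run != 1 else 0)
--         best = min(best, total)
--     return best
-- ===== Notes on version B (the rewrite author's own statement) =====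
-- stated objective: faster
-- what changed: B counts chunk multiplicities by sorting the chunks and scanning runs of equal adjacent chunks with a (total, prev, run) accumulator, summing each run's cost arithmetically, instead of A's dict of frequencies and rebuilding the compressed string by re-materializing list(words.values())[k]/list(words.keys())[k] for every index k, list building and join.
import Mathlib
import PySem

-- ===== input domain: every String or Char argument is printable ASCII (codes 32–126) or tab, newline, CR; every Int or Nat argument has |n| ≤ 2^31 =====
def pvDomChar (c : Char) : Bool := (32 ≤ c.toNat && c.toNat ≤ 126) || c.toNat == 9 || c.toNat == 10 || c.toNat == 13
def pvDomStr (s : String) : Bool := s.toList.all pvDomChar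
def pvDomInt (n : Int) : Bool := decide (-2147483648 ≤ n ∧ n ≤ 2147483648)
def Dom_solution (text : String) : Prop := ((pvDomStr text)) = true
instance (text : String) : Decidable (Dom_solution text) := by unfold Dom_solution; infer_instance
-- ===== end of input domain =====

-- B replaces A's dict-of-frequencies plus string rebuilding by sort-then-scan: it sorts the
-- chunks and sums each run's cost in a single linear scan, never building a dict or the
-- compressed string (objective: faster, measured; sort-then-scan vs dict).

-- ===== PORT A =====
-- literal port of A: a length-list, a chunk-count dict, and the compressed string rebuilt
-- by indexing list(words.values())[k] / list(words.keys())[k] and joined; the indices k are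
-- always in range and `length` is always nonempty, so pyGetD / min?.getD are exact here.
def solutionStep (s : List Char) (i : Int) : Int :=
  let n : Int := PySem.Chars.len s
  let num : Int :=
    if PySem.Int.mod n i ≠ 0 then PySem.Int.floordiv n i + 1 else PySem.Int.floordiv n i
  let words : PySem.Dict (List Char) Int :=
    ((PySem.List.pyRange 0 num).map
        (fun j => PySem.List.slice s (some (j * i)) (some ((j + 1) * i)))).foldl
      (fun (words : PySem.Dict (List Char) Int) word =>
        if words.contains word = false then words.insert word 1
        else words.modify word 0 (· + 1)) ⟨[]⟩
  let make : List (List Char) :=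
    (PySem.List.pyRange 0 (PySem.List.len words.items)).foldl (fun make k =>
      let make :=
        if PySem.List.pyGetD words.values k 0 ≠ 1 then
          make ++ [PySem.Int.toChars (PySem.List.pyGetD words.values k 0)]
        else make
      make ++ [PySem.List.pyGetD words.keys k []]) []
  PySem.Chars.len (PySem.Chars.join [] make)

def solution (text : String) : Int :=
  let s := text.toList
  let n : Int := PySem.Chars.len s
  let length : List Int := [] ++ [n]
  let length :=
    (PySem.List.pyRange 1 (PySem.Int.floordiv n 2 + 1)).foldl
      (fun length i => length ++ [solutionStep s i]) length
  (PySem.List.min? length id).getD 0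

-- ===== PORT B =====
-- literal port of B (Source B): sort the chunks (Python's lexicographic string order is the
-- lexicographic order on List Char), then one scan with (total, prev, run) accumulators
-- flushing each finished run's cost; no dict and no compressed string are built.
def bFlush (prev : Option (List Char)) (run : Int) : Int :=
  match prev with
  | none => 0
  | some w => PySem.Chars.len w + (if run ≠ 1 then PySem.Chars.len (PySem.Int.toChars run) else 0)

def bStep (st : Int × Option (List Char) × Int) (w : List Char) : Int × Option (List Char) × Int :=
  if some w = st.2.1 then (st.1, st.2.1, st.2.2 + 1)
  else (st.1 + bFlush st.2.1 st.2.2, some w, 1)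

def bSort (xs : List (List Char)) : List (List Char) :=
  @PySem.List.sorted _ _ List.instLinearOrder.toLT LinearOrder.toDecidableLT xs (fun x => x) false

def solution_alt (text : String) : Int :=
  let s := text.toList
  let n : Int := PySem.Chars.len s
  (PySem.List.pyRange 1 (PySem.Int.floordiv n 2 + 1)).foldl (fun best i =>
    let chunks := bSort ((PySem.List.pyRange 0 n i).map
        (fun j => PySem.List.slice s (some j) (some (j + i))))
    let st := chunks.foldl bStep (0, none, 0)
    let total := st.1 + bFlush st.2.1 st.2.2
    min best total) n

-- ===== PRECONDITION & SPEC =====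
def Spec_solution (text : String) (out : Int) : Prop := out = solution_alt text
instance (text : String) (out : Int) : Decidable (Spec_solution text out) := by unfold Spec_solution; infer_instance

-- ===== CLAIM (what is proved, stated in full; the proofs are below) =====
def Claim_equal_solution : Prop := ∀ (text : String), Dom_solution text → Spec_solution text (solution text)

-- ===== LEMMAS AND PROOFS =====

-- the cost one distinct chunk with multiplicity c contributes to the compressed length
def pvCost (w : List Char) (c : Int) : Int :=
  PySem.Chars.len w + (if c ≠ 1 then PySem.Chars.len (PySem.Int.toChars c) else 0)

-- the chunk list of unit size i, in B's stride-range form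
def pvChunks (s : List Char) (i : Int) : List (List Char) :=
  (PySem.List.pyRange 0 (PySem.Chars.len s) i).map
    (fun j => PySem.List.slice s (some j) (some (j + i)))

-- the per-unit compressed length, shared normal form of both programs
def pvCanon (L : List (List Char)) : Int :=
  ((PySem.Set.ofList L).map (fun v => pvCost v (L.count v : Int))).sum

def pvTotal (s : List Char) (i : Int) : Int := pvCanon (pvChunks s i)

-- the compressed fragment contributed by one distinct (word, count) pair
def pvFrag (p : List Char × Int) : List (List Char) :=
  (if p.2 ≠ 1 then [PySem.Int.toChars p.2] else []) ++ [p.1]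

-- final flush of B's scan state
def pvFinish (st : Int × Option (List Char) × Int) : Int := st.1 + bFlush st.2.1 st.2.2

-- A's dict-building step equals the insert/getD counting step, pointwise
theorem pv_count_step (d : PySem.Dict (List Char) Int) (w : List Char) :
    (if d.contains w = false then d.insert w 1 else d.modify w 0 (· + 1))
      = d.insert w (d.getD w 0 + 1) := by
  by_cases h : d.contains w
  · simp [h, PySem.Dict.modify]
  · have hg : d.get? w = none :=
      (PySem.Dict.get?_eq_none_iff_contains d w).mpr (by simp [h])
    simp [h, PySem.Dict.getD, hg]

-- both pyRanges enumerate the same number of chunks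
theorem pv_cnt_eq (n i : Int) (hn : 0 ≤ n) (hi : 0 < i) :
    (if 0 < n then ((n + i - 1) / i).toNat else 0)
      = (if PySem.Int.mod n i ≠ 0 then PySem.Int.floordiv n i + 1
          else PySem.Int.floordiv n i).toNat := by
  rw [PySem.Int.floordiv_eq_ediv_of_pos hi, PySem.Int.mod_eq_emod_of_pos hi]
  have hq0 : 0 ≤ n / i := Int.ediv_nonneg hn hi.le
  have h1 : i * (n / i) + n % i = n := Int.mul_ediv_add_emod n i
  have hr0 : 0 ≤ n % i := Int.emod_nonneg n (ne_of_gt hi)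
  have hr1 : n % i < i := Int.emod_lt_of_pos n hi
  by_cases hr : n % i = 0
  · have hrw : n + i - 1 = (i - 1) + i * (n / i) := by omega
    have hdiv : (n + i - 1) / i = n / i := by
      rw [hrw, Int.add_mul_ediv_left _ _ (ne_of_gt hi),
        Int.ediv_eq_zero_of_lt (by omega) (by omega), zero_add]
    rw [hdiv]
    by_cases hn0 : 0 < n
    · simp [hn0, hr]
    · have hn' : n = 0 := by omega
      have : n / i = 0 := by rw [hn']; simp
      simp [hn0, hr, this]
  · have hn0 : 0 < n := by
      rcases lt_or_eq_of_le hn with h | h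
      · exact h
      · exfalso; apply hr; rw [← h]; simp
    have hexp : i * (n / i + 1) = i * (n / i) + i := by ring
    have hrw : n + i - 1 = (n % i - 1) + i * (n / i + 1) := by omega
    have hdiv : (n + i - 1) / i = n / i + 1 := by
      rw [hrw, Int.add_mul_ediv_left _ _ (ne_of_gt hi),
        Int.ediv_eq_zero_of_lt (by omega) (by omega), zero_add]
    rw [hdiv]
    simp [hn0, hr]

-- A's chunk list (num = ceil(n/i) slices of width i at offsets j*i) equals B's (stride range)
theorem pv_chunks_eq (s : List Char) (i : Int) (hi : 0 < i) :
    ((PySem.List.pyRange 0 (if PySem.Int.mod (PySem.Chars.len s) i ≠ 0 then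
          PySem.Int.floordiv (PySem.Chars.len s) i + 1
        else PySem.Int.floordiv (PySem.Chars.len s) i)).map
        (fun j => PySem.List.slice s (some (j * i)) (some ((j + 1) * i))))
      = pvChunks s i := by
  unfold pvChunks
  have hn : (0:Int) ≤ PySem.Chars.len s := by simp [PySem.Chars.len]
  set n : Int := PySem.Chars.len s with hndef
  set num : Int := (if PySem.Int.mod n i ≠ 0 then PySem.Int.floordiv n i + 1
      else PySem.Int.floordiv n i) with hnumdef
  have hnum0 : 0 ≤ num := by
    rw [hnumdef, PySem.Int.floordiv_eq_ediv_of_pos hi]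
    have := Int.ediv_nonneg hn hi.le
    split <;> omega
  have hcast : ((num.toNat : Nat) : Int) = num := Int.toNat_of_nonneg hnum0
  have hR : PySem.List.pyRange 0 n i =
      (List.range (if 0 < n then ((n + i - 1) / i).toNat else 0)).map
        (fun k : Nat => i * (k : Int)) := by
    simp only [PySem.List.pyRange, if_neg (ne_of_gt hi), if_pos hi, zero_add, sub_zero]
  rw [← hcast, PySem.List.pyRange_zero_natCast, hR, pv_cnt_eq n i hn hi, ← hnumdef,
    List.map_map, List.map_map]
  apply List.map_congr_left
  intro k _
  simp only [Function.comp]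
  congr 2 <;> ring

-- A's make-loop over indices equals the flatMap of fragments over the dict items
theorem pv_make_eq (d : PySem.Dict (List Char) Int) :
    (PySem.List.pyRange 0 (PySem.List.len d.items)).foldl (fun make k =>
        let make :=
          if PySem.List.pyGetD d.values k 0 ≠ 1 then
            make ++ [PySem.Int.toChars (PySem.List.pyGetD d.values k 0)]
          else make
        make ++ [PySem.List.pyGetD d.keys k []]) []
      = d.items.flatMap pvFrag := by
  have hval : ∀ k : Int, PySem.List.pyGetD d.values k 0
      = (PySem.List.pyGetD d.items k ([], 0)).2 := by
    intro k
    rw [PySem.Dict.values, ← PySem.List.pyGetD_map (fun p => p.2) d.items k ([], 0)]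
  have hkey : ∀ k : Int, PySem.List.pyGetD d.keys k []
      = (PySem.List.pyGetD d.items k ([], 0)).1 := by
    intro k
    rw [PySem.Dict.keys, ← PySem.List.pyGetD_map (fun p => p.1) d.items k ([], 0)]
  calc (PySem.List.pyRange 0 (PySem.List.len d.items)).foldl (fun make k =>
        let make :=
          if PySem.List.pyGetD d.values k 0 ≠ 1 then
            make ++ [PySem.Int.toChars (PySem.List.pyGetD d.values k 0)]
          else make
        make ++ [PySem.List.pyGetD d.keys k []]) []
      = (PySem.List.pyRange 0 (PySem.List.len d.items)).foldl (fun make k =>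
          (fun make (p : List Char × Int) => make ++ pvFrag p) make
            (PySem.List.pyGetD d.items k ([], 0))) [] := by
        apply PySem.List.foldl_congr_mem
        intro make k _
        rw [hval, hkey]
        by_cases h : (PySem.List.pyGetD d.items k ([], 0)).2 ≠ 1 <;>
          simp [h, pvFrag]
    _ = d.items.foldl (fun make p => make ++ pvFrag p) [] := by
        rw [PySem.List.foldl_pyRange_pyGetD d.items ([], 0)
          (fun make p => make ++ pvFrag p) [] (le_refl 0)]
        simp
    _ = d.items.flatMap pvFrag := by
        rw [PySem.List.foldl_append_eq_flatMap pvFrag d.items []]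
        simp

-- joining with '' and measuring equals summing the per-item costs
theorem pv_join_nil_eq_flatten (l : List (List Char)) :
    PySem.Chars.join [] l = l.flatten := by
  induction l with
  | nil => simp [PySem.Chars.join_nil]
  | cons x l ih =>
    cases l with
    | nil => simp [PySem.Chars.join_singleton]
    | cons y r => rw [PySem.Chars.join_cons_cons]; simp [ih]

theorem pv_len_frag_sum (l : List (List Char × Int)) :
    PySem.Chars.len (PySem.Chars.join [] (l.flatMap pvFrag))
      = (l.map (fun wc => pvCost wc.1 wc.2)).sum := by
  rw [pv_join_nil_eq_flatten]
  induction l with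
  | nil => simp [PySem.Chars.len]
  | cons p l ih =>
    rw [List.flatMap_cons, List.flatten_append, List.map_cons, List.sum_cons, ← ih]
    simp only [PySem.Chars.len]
    by_cases h : p.2 ≠ 1
    · simp [pvFrag, pvCost, h, PySem.Chars.len]; ring
    · simp [pvFrag, pvCost, h, PySem.Chars.len]

-- min of a materialized list (first extremal) equals the scalar fold of `min`
theorem pv_min_foldl (xs : List Int) (m : Int) :
    (PySem.List.min? (m :: xs) id).getD 0 = xs.foldl min m := by
  induction xs generalizing m with
  | nil => simp [PySem.List.min?]
  | cons x xs ih =>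
    have h : PySem.List.min? (m :: x :: xs) id = PySem.List.min? (min m x :: xs) id := by
      simp only [PySem.List.min?, List.foldl_cons, id]
      congr 1
      by_cases h : x < m
      · rw [if_pos h, min_eq_right h.le]
      · rw [if_neg h, min_eq_left (le_of_not_gt h)]
    rw [h, ih (min m x), List.foldl_cons]

-- A's per-unit work equals the canonical sum over distinct chunks
theorem pv_step_eq (s : List Char) (i : Int) (hi : 0 < i) :
    solutionStep s i = pvTotal s i := by
  unfold solutionStep
  simp only []
  rw [pv_chunks_eq s i hi]
  have hstep : (fun (words : PySem.Dict (List Char) Int) word =>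
      if words.contains word = false then words.insert word 1
      else words.modify word 0 (· + 1))
      = (fun (words : PySem.Dict (List Char) Int) word =>
          words.insert word (words.getD word 0 + 1)) := by
    funext d w
    have := pv_count_step d w
    by_cases h : d.contains w
    · simpa [h] using this
    · simpa [h] using this
  rw [hstep]
  rw [pv_make_eq, pv_len_frag_sum]
  rw [show ((⟨[]⟩ : PySem.Dict (List Char) Int) = PySem.Dict.empty) from rfl,
    PySem.Dict.foldl_insert_getD_add_one_eq_counter, PySem.Dict.items_counter]
  unfold pvTotal pvCanon
  rw [List.map_map]
  rfl

-- ofList commutes with filter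
theorem pv_ofList_filter {α : Type} [BEq α] [LawfulBEq α] (p : α → Bool) (L : List α) :
    PySem.Set.ofList (L.filter p) = (PySem.Set.ofList L).filter p := by
  induction L with
  | nil => simp [PySem.Set.ofList_nil]
  | cons a L ih =>
    by_cases hpa : p a
    · rw [List.filter_cons_of_pos hpa, PySem.Set.ofList_cons, PySem.Set.ofList_cons,
        PySem.Set.discard, PySem.Set.discard, ih, List.filter_cons_of_pos hpa,
        List.filter_filter, List.filter_filter]
      congr 1
      apply List.filter_congr
      intro x _
      exact Bool.and_comm _ _
    · rw [List.filter_cons_of_neg hpa, PySem.Set.ofList_cons, List.filter_cons_of_neg hpa,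
        PySem.Set.discard, List.filter_filter, ih]
      apply List.filter_congr
      intro x _
      by_cases hpx : p x
      · have hxa : (x == a) = false := by
          rcases eq_or_ne x a with rfl | hne
          · exact absurd hpx hpa
          · simp [hne]
        simp [hpx, hxa]
      · simp [hpx]

-- peeling the head off the canonical sum over distinct chunks
theorem pv_sum_cons (x : List Char) (L : List (List Char)) :
    ((PySem.Set.ofList (x :: L)).map (fun v => pvCost v ((x :: L).count v : Int))).sum
      = pvCost x ((L.count x : Int) + 1)
        + ((PySem.Set.ofList (L.filter (fun v => !(v == x)))).map
            (fun v => pvCost v (L.count v : Int))).sum := by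
  rw [PySem.Set.ofList_cons, List.map_cons, List.sum_cons]
  congr 1
  · rw [List.count_cons_self]
    push_cast
    ring_nf
  · rw [pv_ofList_filter]
    show ((PySem.Set.discard (PySem.Set.ofList L) x).map _).sum = _
    rw [PySem.Set.discard]
    apply congrArg
    apply List.map_congr_left
    intro v hv
    have hvx : v ≠ x := by
      have := List.of_mem_filter hv
      simpa using this
    simp [Ne.symm hvx]

-- B's scan from a live run (prev = some w, run = c) on a sorted remainder
theorem pv_run_go (L : List (List Char)) (hp : L.Pairwise (· ≤ ·)) :
    ∀ (w : List Char), (∀ y ∈ L, w ≤ y) → ∀ (c total : Int),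
    pvFinish (L.foldl bStep (total, some w, c))
      = total + pvCost w (c + (L.count w : Int))
        + ((PySem.Set.ofList (L.filter (fun v => !(v == w)))).map
            (fun v => pvCost v (L.count v : Int))).sum := by
  induction L with
  | nil =>
    intro w _ c total
    simp [pvFinish, bFlush, pvCost, PySem.Set.ofList_nil]
  | cons x L ih =>
    rcases List.pairwise_cons.mp hp with ⟨hx, hp'⟩
    intro w hw c total
    have hwx : w ≤ x := hw x List.mem_cons_self
    rw [List.foldl_cons]
    by_cases hxw : x = w
    · subst hxw
      have hstep : bStep (total, some x, c) x = (total, some x, c + 1) := by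
        simp [bStep]
      rw [hstep, ih hp' x hx (c + 1) total]
      rw [List.count_cons_self, List.filter_cons]
      simp only [beq_self_eq_true, Bool.not_true, if_neg (by simp : ¬ (false = true))]
      have hmap : (PySem.Set.ofList (L.filter (fun v => !(v == x)))).map
          (fun v => pvCost v ((x :: L).count v : Int))
          = (PySem.Set.ofList (L.filter (fun v => !(v == x)))).map
            (fun v => pvCost v (L.count v : Int)) := by
        apply List.map_congr_left
        intro v hv
        have hvf : v ∈ L.filter (fun v => !(v == x)) := by
          simpa [PySem.Set.mem_ofList] using hv
        have hvx : v ≠ x := by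
          have := List.of_mem_filter hvf
          simpa using this
        simp [Ne.symm hvx]
      rw [hmap]
      push_cast
      ring_nf
    · have hwl : ∀ y ∈ x :: L, w ≠ y := by
        intro y hy
        have hwx' : w < x := lt_of_le_of_ne hwx (fun h => hxw h.symm)
        rcases List.mem_cons.mp hy with rfl | hy'
        · exact ne_of_lt hwx'
        · exact ne_of_lt (lt_of_lt_of_le hwx' (hx y hy'))
      have hstep : bStep (total, some w, c) x
          = (total + pvCost w c, some x, 1) := by
        simp only [bStep]
        rw [if_neg (by simpa using fun h : x = w => hxw h)]
        rfl
      rw [hstep, ih hp' x hx 1 (total + pvCost w c)]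
      have hcw : (x :: L).count w = 0 :=
        List.count_eq_zero_of_not_mem (fun h => hwl w h rfl)
      have hfw : (x :: L).filter (fun v => !(v == w)) = x :: L := by
        apply List.filter_eq_self.mpr
        intro v hv
        simpa using (hwl v hv).symm
      rw [hcw, hfw, pv_sum_cons]
      ring_nf
-- (ring_nf matches the two linear Int combinations of identical pvCost/sum atoms)

-- B's whole scan computes the canonical sum over distinct chunks of a sorted list
theorem pv_run (L : List (List Char)) (hp : L.Pairwise (· ≤ ·)) :
    pvFinish (L.foldl bStep (0, none, 0))
      = ((PySem.Set.ofList L).map (fun v => pvCost v (L.count v : Int))).sum := by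
  cases L with
  | nil => simp [pvFinish, bFlush]
  | cons x L =>
    rcases List.pairwise_cons.mp hp with ⟨hx, hp'⟩
    rw [List.foldl_cons]
    have hstep : bStep (0, none, 0) x = (0, some x, 1) := by
      simp [bStep, bFlush]
    rw [hstep, pv_run_go L hp' x hx 1 0, pv_sum_cons]
    ring_nf

-- the canonical sum is invariant under permutation of the chunk list
theorem pv_canon_perm (L M : List (List Char)) (h : L.Perm M) :
    ((PySem.Set.ofList L).map (fun v => pvCost v (L.count v : Int))).sum = pvCanon M := by
  unfold pvCanon
  have h1 : ((PySem.Set.ofList L).map (fun v => pvCost v (L.count v : Int)))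
      = ((PySem.Set.ofList L).map (fun v => pvCost v (M.count v : Int))) := by
    apply List.map_congr_left
    intro v _
    rw [h.count_eq]
  have h2 : (PySem.Set.ofList L).Perm (PySem.Set.ofList M) := by
    apply (List.perm_ext_iff_of_nodup (PySem.Set.nodup_ofList L)
      (PySem.Set.nodup_ofList M)).mpr
    intro a
    rw [PySem.Set.mem_ofList, PySem.Set.mem_ofList, h.mem_iff]
  rw [h1]
  exact (h2.map _).sum_eq

-- B's per-unit work equals the canonical sum
theorem pv_alt_step_eq (s : List Char) (i : Int) :
    pvFinish ((bSort (pvChunks s i)).foldl bStep (0, none, 0)) = pvTotal s i := by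
  have hp : (bSort (pvChunks s i)).Pairwise (· ≤ ·) :=
    PySem.List.sorted_pairwise (pvChunks s i) (fun x => x)
  have hperm : (bSort (pvChunks s i)).Perm (pvChunks s i) :=
    @PySem.List.sorted_perm _ _ _ LinearOrder.toDecidableLT (pvChunks s i) _ _
  rw [pv_run _ hp]
  exact pv_canon_perm _ _ hperm

theorem pv_A_eq (text : String) :
    solution text =
      ((PySem.List.pyRange 1 (PySem.Int.floordiv (PySem.Chars.len text.toList) 2 + 1)).map
          (pvTotal text.toList)).foldl min (PySem.Chars.len text.toList) := by
  unfold solution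
  simp only []
  set s := text.toList
  set n : Int := PySem.Chars.len s with hn
  set r := PySem.List.pyRange 1 (PySem.Int.floordiv n 2 + 1) with hr
  rw [PySem.List.foldl_congr_mem r _ (fun length i => length ++ [pvTotal s i]) _
    (by
      intro acc i hi
      simp only []
      have hi1 : (1:Int) ≤ i := ((PySem.List.mem_pyRange_one).1 (hr ▸ hi)).1
      rw [pv_step_eq s i (by omega)])]
  rw [PySem.List.foldl_append_singleton_eq_map (pvTotal s) r ([] ++ [n])]
  simp only [List.nil_append]
  exact pv_min_foldl _ n

theorem pv_B_eq (text : String) :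
    solution_alt text =
      ((PySem.List.pyRange 1 (PySem.Int.floordiv (PySem.Chars.len text.toList) 2 + 1)).map
          (pvTotal text.toList)).foldl min (PySem.Chars.len text.toList) := by
  unfold solution_alt
  simp only []
  set s := text.toList
  set n : Int := PySem.Chars.len s with hn
  set r := PySem.List.pyRange 1 (PySem.Int.floordiv n 2 + 1) with hr
  rw [PySem.List.foldl_congr_mem r _ (fun best i => min best (pvTotal s i)) _
    (by
      intro best i _
      simp only []
      exact congrArg (min best) (pv_alt_step_eq s i))]
  rw [← List.foldl_map]

-- ===== VERDICT (by name: the statement is the Claim_ definition above) =====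
theorem solution_spec : Claim_equal_solution := by
  intro text _
  unfold Spec_solution
  rw [pv_A_eq, pv_B_eq]
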